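-- pv_equiv track=rewrite | github.com/eldrad294/ICS5114_Practical_Assignment | streaming/src/coding_framework/BDATextProcessing.py | __single_character_removal
-- ===== SOURCE A (Python) =====
-- def __single_character_removal(str_input):
--     """
--     Eliminates phrases which consist of stand alone characters.
--
--     Also ensures that punctuation / special symbols is stripped.
--     :param str_input:
--     :return: result_stripped:
--     """
--     result, result_stripped = [], []
--     stripped_symbols = ("}", "{", "[", "]", "?", ":", "!", "/", ";", ".", ",", "(", ")", "#", "$", "%", "^", "&",
--                         "*", "~", "-", "'", "+", "-", "\'", "\\", "\b", "\t", "\n", "\r", "\f", "\"", "\\uFEFF",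
--                         "`")
--
--     for word in str_input:
--         temp_word = word
--         for char in stripped_symbols:
--             temp_word = temp_word.replace(char, "")
--         result_stripped.append(temp_word)
--
--     for word in result_stripped:
--         if len(word) > 1:
--             result.append(word)
--
--     return result
-- ===== SOURCE B (Python) =====
-- def __single_character_removal(str_input):
--     """Strip symbol characters from each word in one pass, keep words longer than 1 char."""
--     symbols = {"}", "{", "[", "]", "?", ":", "!", "/", ";", ".", ",", "(", ")", "#", "$", "%",
--                "^", "&", "*", "~", "-", "'", "+", "\\", "\b", "\t", "\n", "\r", "\f", "\"", "`"}
--     result = []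
--     for word in str_input:
--         cleaned = "".join(c for c in word if c not in symbols)
--         if len(cleaned) > 1:
--             result.append(cleaned)
--     return result
-- ===== Notes on version B (the rewrite author's own statement) =====
-- stated objective: faster
-- what changed: Replaces the per-word loop of 35 full-string str.replace passes (including a dead multi-char '\uFEFF' entry whose backslash is stripped earlier) with a single character-filtering pass per word against a set of the symbol characters, filtering and collecting in one loop.
import Mathlib
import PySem

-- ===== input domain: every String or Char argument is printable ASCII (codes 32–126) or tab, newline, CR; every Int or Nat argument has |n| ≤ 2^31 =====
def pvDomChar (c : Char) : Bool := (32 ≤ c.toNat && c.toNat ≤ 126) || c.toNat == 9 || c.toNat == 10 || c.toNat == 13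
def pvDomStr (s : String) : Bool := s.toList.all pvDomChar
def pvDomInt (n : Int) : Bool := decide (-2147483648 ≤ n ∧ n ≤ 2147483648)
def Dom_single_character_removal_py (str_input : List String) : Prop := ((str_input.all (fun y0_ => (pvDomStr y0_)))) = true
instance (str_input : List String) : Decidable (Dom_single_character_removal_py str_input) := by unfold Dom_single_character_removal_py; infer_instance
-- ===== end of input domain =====

-- B replaces A's 35 per-word str.replace passes by a single character-filtering pass per word (idiomatic/constant-factor faster); return values agree on all inputs.

-- ===== PORT A =====
def pvStrippedSymbols : List String :=
  ["}", "{", "[", "]", "?", ":", "!", "/", ";", ".", ",", "(", ")", "#", "$", "%", "^", "&",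
   "*", "~", "-", "'", "+", "-", "'", "\\", "\x08", "\t", "\n", "\r", "\x0c", "\"", "\\uFEFF",
   "`"]

def single_character_removal_py (str_input : List String) : List String :=
  let result_stripped := str_input.foldl
    (fun acc word =>
      acc ++ [pvStrippedSymbols.foldl (fun t ch => PySem.Str.replace t ch "") word]) []
  result_stripped.foldl (fun acc word => if 1 < PySem.Str.len word then acc ++ [word] else acc) []

-- ===== PORT B =====
def pvSymbolsB : PySem.Set Char :=
  PySem.Set.ofList ['}', '{', '[', ']', '?', ':', '!', '/', ';', '.', ',', '(', ')', '#', '$',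
    '%', '^', '&', '*', '~', '-', '\'', '+', '\\', '\x08', '\t', '\n', '\r', '\x0c', '\"', '`']

def single_character_removal_py_alt (str_input : List String) : List String :=
  str_input.foldl
    (fun result word =>
      let cleaned := String.ofList (word.toList.filter (fun c => !(PySem.Set.contains pvSymbolsB c)))
      if 1 < PySem.Str.len cleaned then result ++ [cleaned] else result) []

-- ===== PRECONDITION & SPEC =====
def Spec_single_character_removal_py (str_input : List String) (out : List String) : Prop := out = single_character_removal_py_alt str_input
instance (str_input : List String) (out : List String) : Decidable (Spec_single_character_removal_py str_input out) := by unfold Spec_single_character_removal_py; infer_instance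

-- ===== CLAIM (what is proved, stated in full; the proofs are below) =====
def Claim_equal_single_character_removal_py : Prop := ∀ (str_input : List String), Dom_single_character_removal_py str_input → Spec_single_character_removal_py str_input (single_character_removal_py str_input)

-- ===== LEMMAS AND PROOFS =====

-- replace with a single-character pattern and empty replacement is a character filter
theorem pv_go_single (c : Char) : ∀ (fuel : Nat) (l acc : List Char), l.length ≤ fuel →
    PySem.Chars.replace.go [c] [] fuel l acc = acc.reverse ++ l.filter (· != c) := by
  intro fuel
  induction fuel with
  | zero => intro l acc h
            have : l = [] := List.eq_nil_of_length_eq_zero (Nat.le_zero.mp h)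
            subst this; simp [PySem.Chars.replace.go]
  | succ n ih =>
      intro l acc h
      cases l with
      | nil => simp [PySem.Chars.replace.go]
      | cons x t =>
          by_cases hx : x = c
          · subst hx
            have : List.isPrefixOf [x] (x :: t) = true := by simp [List.isPrefixOf]
            simp only [PySem.Chars.replace.go, this, if_pos, List.length_cons,
              List.drop_succ_cons, List.drop_zero, List.length_nil, List.reverse_nil,
              List.nil_append]
            rw [ih t acc (by simpa using Nat.le_of_succ_le_succ h)]
            simp
          · have : List.isPrefixOf [c] (x :: t) = false := by
              simp [List.isPrefixOf]; exact fun hh => (hx hh.symm).elim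
            simp only [PySem.Chars.replace.go, this, if_neg, Bool.false_eq_true, not_false_iff]
            rw [ih t (x :: acc) (by simpa using Nat.le_of_succ_le_succ h)]
            simp [hx, bne]

theorem pv_replace_single (l : List Char) (c : Char) :
    PySem.Chars.replace l [c] [] = l.filter (· != c) := by
  simp only [PySem.Chars.replace, List.isEmpty]
  rw [pv_go_single c l.length l [] (le_refl _)]
  simp

-- replace with a pattern whose first character does not occur is the identity
theorem pv_go_dead (c0 : Char) (rest : List Char) : ∀ (fuel : Nat) (l acc : List Char),
    c0 ∉ l → PySem.Chars.replace.go (c0 :: rest) [] fuel l acc = acc.reverse ++ l := by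
  intro fuel
  induction fuel with
  | zero => intro l acc _; simp [PySem.Chars.replace.go]
  | succ n ih =>
      intro l acc h
      cases l with
      | nil => simp [PySem.Chars.replace.go]
      | cons x t =>
          have hne : c0 ≠ x := fun hh => h (hh ▸ List.mem_cons_self ..)
          have : List.isPrefixOf (c0 :: rest) (x :: t) = false := by
            simp [List.isPrefixOf]; exact fun hh => (hne hh).elim
          simp only [PySem.Chars.replace.go, this, if_neg, Bool.false_eq_true, not_false_iff]
          rw [ih t (x :: acc) (fun hm => h (List.mem_cons_of_mem _ hm))]
          simp

theorem pv_replace_dead (l : List Char) (c0 : Char) (rest : List Char) (h : c0 ∉ l) :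
    PySem.Chars.replace l (c0 :: rest) [] = l := by
  simp only [PySem.Chars.replace, List.isEmpty]
  rw [pv_go_dead c0 rest l.length l [] h]
  simp

-- folding single-character replaces over a list of characters = one filter
theorem pv_foldl_replace_single (cs : List Char) : ∀ (l : List Char),
    cs.foldl (fun t c => PySem.Chars.replace t [c] []) l
      = l.filter (fun x => !(cs.contains x)) := by
  induction cs with
  | nil => intro l; simp
  | cons c cs ih =>
      intro l
      rw [List.foldl_cons, pv_replace_single, ih, List.filter_filter]
      apply List.filter_congr
      intro a _
      simp [Bool.not_or, Bool.and_comm, bne, beq_eq_decide]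


-- the single characters A strips before the (dead) "\\uFEFF" entry, in A's order
def pvS1 : List Char :=
  ['}', '{', '[', ']', '?', ':', '!', '/', ';', '.', ',', '(', ')', '#', '$', '%', '^', '&',
   '*', '~', '-', '\'', '+', '-', '\'', '\\', '\x08', '\t', '\n', '\r', '\x0c', '\"']

theorem pv_syms_split : pvStrippedSymbols
    = pvS1.map (fun c => String.ofList [c]) ++ ["\\uFEFF", "`"] := by decide

theorem pv_foldl_str_chars (cs : List Char) : ∀ (w : String),
    (cs.foldl (fun t c => PySem.Str.replace t (String.ofList [c]) "") w).toList
      = cs.foldl (fun l c => PySem.Chars.replace l [c] []) w.toList := by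
  induction cs with
  | nil => intro w; simp
  | cons c cs ih =>
      intro w
      rw [List.foldl_cons, List.foldl_cons, ih]
      simp

-- the whole per-word replace chain of A = B's one-pass character filter
theorem pv_clean_word (w : String) :
    pvStrippedSymbols.foldl (fun t ch => PySem.Str.replace t ch "") w
      = String.ofList (w.toList.filter (fun c => !(PySem.Set.contains pvSymbolsB c))) := by
  apply String.ext
  rw [pv_syms_split, List.foldl_append, List.foldl_map]
  simp only [List.foldl_cons, List.foldl_nil, PySem.Str.toList_replace]
  rw [pv_foldl_str_chars, pv_foldl_replace_single]
  have hdead : ('\\' : Char) ∉ w.toList.filter (fun x => !(pvS1.contains x)) := by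
    intro hm
    have := List.of_mem_filter hm
    simp [pvS1] at this
  rw [show ("\\uFEFF" : String).toList = '\\' :: ['u','F','E','F','F'] from rfl,
      show ("" : String).toList = [] from rfl,
      pv_replace_dead _ _ _ hdead,
      show ("`" : String).toList = ['`'] from rfl,
      pv_replace_single, List.filter_filter]
  simp only [String.toList_ofList]
  apply List.filter_congr
  intro a _
  have hmem : a ∈ pvSymbolsB ↔ a = '`' ∨ a ∈ pvS1 := by
    have h1 : pvSymbolsB.all (fun x => ('`' :: pvS1).contains x) = true := by decide
    have h2 : ('`' :: pvS1).all (fun x => pvSymbolsB.contains x) = true := by decide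
    constructor
    · intro h
      have := List.all_eq_true.mp h1 a h
      simpa [List.elem_iff] using this
    · intro h
      have hh : a ∈ ('`' :: pvS1) := by simpa using h
      have := List.all_eq_true.mp h2 a hh
      simpa [List.elem_iff] using this
  have this : PySem.Set.contains pvSymbolsB a = (a == '`' || pvS1.contains a) := by
    simp only [PySem.Set.contains]
    rw [Bool.eq_iff_iff]
    simp only [List.elem_iff, beq_iff_eq, Bool.or_eq_true]
    exact hmem.trans (by tauto)
  rw [this]
  simp [Bool.not_or, bne]

-- ===== VERDICT (by name: the statement is the Claim_ definition above) =====
theorem single_character_removal_py_spec : Claim_equal_single_character_removal_py := by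
  intro str_input _
  unfold Spec_single_character_removal_py single_character_removal_py single_character_removal_py_alt
  simp only []
  rw [PySem.List.foldl_append_singleton_eq_map]
  simp only [List.nil_append]
  have hmap : List.map (fun word => List.foldl (fun t ch => PySem.Str.replace t ch "") word pvStrippedSymbols) str_input
      = List.map (fun word => String.ofList (List.filter (fun c => !(PySem.Set.contains pvSymbolsB c)) word.toList)) str_input :=
    List.map_congr_left (fun w _ => pv_clean_word w)
  rw [hmap, List.foldl_map]
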